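-- pv_equiv track=rewrite | github.com/1solution/PYTHON | wikifunc.py | cut_by_preposition
-- ===== SOURCE A (Python) =====
-- def cut_by_preposition(definitions):
--     # pokud najde Rx, useknuti definicice - at neni zbytecne dlouha
--     new_definition = []
--     new_definitions = []
--     found_noun = False
--     delete = False
--
--     for definition in definitions:
--         for word in definition:
--             if not found_noun and word[0][0] == 'R': # pokud je nalezena predlozka, ale jeste ne podst jmeno, neukladat
--                 delete = True
--                 break
--             elif found_noun and word[0][0] == 'R': # musi to napred najit N, nez to zacne mazat neco za predlozkami
--                 break
--             elif word[0][0] == 'N' and (word[0][4] == '1' or word[0][4] == '7'):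
--                 found_noun = True
--             new_definition.append(word)
--
--         if len(new_definition) > 0 and not delete:
--             new_definitions.append(new_definition)
--         new_definition = []
--         found_noun = False
--         delete = False
--
--     return new_definitions
-- ===== SOURCE B (Python) =====
-- def cut_by_preposition(definitions):
--     # find-cut-point-then-slice: cut each definition at its first preposition (Rx),
--     # then keep the prefix iff it is non-empty and (no cut happened or it contains a noun in case 1/7)
--     new_definitions = []
--     for definition in definitions:
--         cut = next((i for i, word in enumerate(definition) if word[0][0] == 'R'), None)
--         prefix = definition if cut is None else definition[:cut]
--         found_noun = any(word[0][0] == 'N' and word[0][4] in ('1', '7') for word in prefix)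
--         if prefix and (cut is None or found_noun):
--             new_definitions.append(prefix)
--     return new_definitions
-- ===== Notes on version B (the rewrite author's own statement) =====
-- stated objective: simpler
-- what changed: A's single stateful accumulate-until-break loop with found_noun/delete flags is replaced by a find-the-first-preposition index, slice the prefix, then an any() noun test over the prefix.
-- outside the precondition, e.g. on cut_by_preposition([[['N***7'], ['N']]]): A raises IndexError, B returns [[['N***7'], ['N']]]
import Mathlib
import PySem

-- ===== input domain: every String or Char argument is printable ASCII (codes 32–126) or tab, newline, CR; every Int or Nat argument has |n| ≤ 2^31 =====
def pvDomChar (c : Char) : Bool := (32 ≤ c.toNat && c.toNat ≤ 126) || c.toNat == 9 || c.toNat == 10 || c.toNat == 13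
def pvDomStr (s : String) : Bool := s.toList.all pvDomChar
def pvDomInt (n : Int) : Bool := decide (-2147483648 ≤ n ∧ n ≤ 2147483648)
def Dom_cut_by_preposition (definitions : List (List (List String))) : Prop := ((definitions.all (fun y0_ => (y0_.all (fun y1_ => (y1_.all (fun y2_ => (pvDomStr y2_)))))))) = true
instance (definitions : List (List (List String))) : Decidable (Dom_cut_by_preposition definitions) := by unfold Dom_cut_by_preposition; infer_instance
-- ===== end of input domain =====

-- B replaces A's stateful accumulate-until-break loop by a find-cut-point, slice, then test decomposition (objective: simpler).

-- shared primitive accessors: word[0] and word[0][i] (defaults are only reached outside Pre_)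
def pvTag (w : List String) : String := (PySem.List.pyGet? w 0).getD ""
def pvCh (w : List String) (i : Int) : Char := (PySem.Str.pyGet? (pvTag w) i).getD ' '

-- ===== PORT A =====
-- inner `for word in definition` loop: state = (new_definition, found_noun); returns (new_definition, delete)
def pvInnerA : List (List String) → List (List String) → Bool → (List (List String)) × Bool
  | [], acc, _ => (acc, false)
  | w :: ws, acc, found =>
    if ¬ found ∧ pvCh w 0 = 'R' then (acc, true)
    else if found ∧ pvCh w 0 = 'R' then (acc, false)
    else if pvCh w 0 = 'N' ∧ (pvCh w 4 = '1' ∨ pvCh w 4 = '7') then pvInnerA ws (acc ++ [w]) true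
    else pvInnerA ws (acc ++ [w]) found

def cut_by_preposition (definitions : List (List (List String))) : List (List (List String)) :=
  definitions.foldl
    (fun nds d =>
      let r := pvInnerA d [] false
      if 0 < r.1.length ∧ ¬ r.2 = true then nds ++ [r.1] else nds) []

-- ===== PORT B =====
def pvIsR (w : List String) : Bool := pvCh w 0 == 'R'
def pvIsNoun (w : List String) : Bool := pvCh w 0 == 'N' && (pvCh w 4 == '1' || pvCh w 4 == '7')

-- prefix = definition if cut is None else definition[:cut]
def pvPfx (d : List (List String)) : List (List String) :=
  match d.findIdx? pvIsR with
  | none => d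
  | some i => d.take i

def cut_by_preposition_alt (definitions : List (List (List String))) : List (List (List String)) :=
  definitions.foldl
    (fun nds d =>
      if (!(pvPfx d).isEmpty && ((d.findIdx? pvIsR).isNone || (pvPfx d).any pvIsNoun)) = true
      then nds ++ [pvPfx d] else nds) []

-- ===== PRECONDITION & SPEC =====
-- Pre_ excludes exactly the inputs on which Python A raises IndexError: some definition has,
-- before (and including) its first preposition word, an empty word, an empty tag, or a noun
-- tag shorter than 5 characters (A reads word[0][0], and word[0][4] on every 'N' word it scans).
def pvPreDef : List (List String) → Bool
  | [] => true
  | w :: ws =>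
    decide (w ≠ []) && decide (pvTag w ≠ "") &&
    (if pvCh w 0 = 'R' then true
     else (decide (pvCh w 0 ≠ 'N') || decide (5 ≤ (pvTag w).toList.length)) && pvPreDef ws)

def Pre_cut_by_preposition (definitions : List (List (List String))) : Prop :=
  (definitions.all pvPreDef) = true
instance (definitions : List (List (List String))) : Decidable (Pre_cut_by_preposition definitions) := by
  unfold Pre_cut_by_preposition; infer_instance

def pvWitness_cut_by_preposition : List (List (List String)) :=
  [[["NNFS1", "dog"], ["VB", "runs"]], [["RR", "with"], ["NNFS7", "cat"]]]

def Spec_cut_by_preposition (definitions : List (List (List String))) (out : List (List (List String))) : Prop := out = cut_by_preposition_alt definitions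
instance (definitions : List (List (List String))) (out : List (List (List String))) : Decidable (Spec_cut_by_preposition definitions out) := by unfold Spec_cut_by_preposition; infer_instance

-- ===== CLAIM (what is proved, stated in full; the proofs are below) =====
def Claim_equal_cut_by_preposition : Prop := ∀ (definitions : List (List (List String))), Dom_cut_by_preposition definitions → Pre_cut_by_preposition definitions → Spec_cut_by_preposition definitions (cut_by_preposition definitions)

-- ===== LEMMAS AND PROOFS =====

lemma pvPfx_nil : pvPfx [] = [] := rfl

lemma pvPfx_cons_R {w : List String} (ws : List (List String)) (h : pvIsR w = true) :
    pvPfx (w :: ws) = [] := by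
  simp [pvPfx, List.findIdx?_cons, h]

lemma pvPfx_cons_not_R {w : List String} (ws : List (List String)) (h : pvIsR w = false) :
    pvPfx (w :: ws) = w :: pvPfx ws := by
  simp only [pvPfx, List.findIdx?_cons, h, if_neg Bool.false_ne_true]
  cases hf : List.findIdx? pvIsR ws <;> simp

lemma findIdx?_cons_not_R {w : List String} (ws : List (List String)) (h : pvIsR w = false) :
    ((w :: ws).findIdx? pvIsR).isSome = (ws.findIdx? pvIsR).isSome := by
  simp [List.findIdx?_cons, h]

lemma pvInnerA_eq (d : List (List String)) : ∀ (acc : List (List String)) (found : Bool),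
    pvInnerA d acc found =
      (acc ++ pvPfx d,
       (d.findIdx? pvIsR).isSome && !(found || (pvPfx d).any pvIsNoun)) := by
  induction d with
  | nil => intro acc found; simp [pvInnerA, pvPfx_nil]
  | cons w ws ih =>
    intro acc found
    by_cases hR : pvCh w 0 = 'R'
    · have hR' : pvIsR w = true := by simp [pvIsR, hR]
      rw [pvPfx_cons_R ws hR']
      cases found <;>
        simp [pvInnerA, hR, List.findIdx?_cons, hR']
    · have hR' : pvIsR w = false := by simp [pvIsR, hR]
      rw [pvPfx_cons_not_R ws hR']
      by_cases hN : pvCh w 0 = 'N' ∧ (pvCh w 4 = '1' ∨ pvCh w 4 = '7')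
      · have hN' : pvIsNoun w = true := by
          simp [pvIsNoun, hN.1]
          rcases hN.2 with h | h <;> simp [h]
        cases found <;>
          simp [pvInnerA, hR, hN, ih, findIdx?_cons_not_R ws hR', hN']
      · have hN' : pvIsNoun w = false := by
          simp only [pvIsNoun, Bool.and_eq_false_iff]
          by_cases h0 : pvCh w 0 = 'N'
          · right
            have : ¬ (pvCh w 4 = '1' ∨ pvCh w 4 = '7') := fun hc => hN ⟨h0, hc⟩
            push Not at this
            simp [this.1, this.2]
          · left; simp [h0]
        cases found <;>
          simp [pvInnerA, hR, hN, ih, findIdx?_cons_not_R ws hR', hN']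

lemma step_eq (nds : List (List (List String))) (d : List (List String)) :
    (let r := pvInnerA d [] false
     if 0 < r.1.length ∧ ¬ r.2 = true then nds ++ [r.1] else nds) =
    (if (!(pvPfx d).isEmpty && ((d.findIdx? pvIsR).isNone || (pvPfx d).any pvIsNoun)) = true
     then nds ++ [pvPfx d] else nds) := by
  rw [pvInnerA_eq]
  simp only [List.nil_append, Bool.false_or]
  cases hp : pvPfx d with
  | nil => simp
  | cons x xs =>
    cases hs : (d.findIdx? pvIsR) <;>
      cases ha : (x :: xs).any pvIsNoun <;>
        simp [List.length_cons]

-- ===== VERDICT (by name: the statement is the Claim_ definition above) =====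
theorem cut_by_preposition_spec : Claim_equal_cut_by_preposition := by
  intro definitions hD hP
  clear hD hP
  unfold Spec_cut_by_preposition cut_by_preposition cut_by_preposition_alt
  induction definitions using List.reverseRecOn with
  | nil => rfl
  | append_singleton ds d ih =>
    rw [List.foldl_append, List.foldl_append, ih]
    simp only [List.foldl_cons, List.foldl_nil]
    exact step_eq _ d
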